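-- pv_equiv track=rewrite | github.com/norlab-ulaval/RTS_project | scripts/theodolite_function.py | find_prism_not_moving_time
-- ===== SOURCE A (Python) =====
-- def find_prism_not_moving_time(not_moving_time, time_trimble_1, time_trimble_2, time_trimble_3, number_points_limit):
-- 	not_moving_prism_1 = []
-- 	not_moving_prism_2 = []
-- 	not_moving_prism_3 = []
-- 	number_points_limit = 0
-- 	for i in not_moving_time:
-- 		  debut = i[0]
-- 		  fin = i[1]
-- 		  list_1 = []
-- 		  list_2 = []
-- 		  list_3 = []
-- 		  for j1 in range(0,len(time_trimble_1)):
-- 		      if(time_trimble_1[j1]>= debut and time_trimble_1[j1]<fin):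
-- 		          list_1.append(j1)
-- 		  for j2 in range(0,len(time_trimble_2)):
-- 		      if(time_trimble_2[j2]>= debut and time_trimble_2[j2]<fin):
-- 		          list_2.append(j2)
-- 		  for j3 in range(0,len(time_trimble_3)):
-- 		      if(time_trimble_3[j3]>= debut and time_trimble_3[j3]<fin):
-- 		          list_3.append(j3)
-- 		  if(len(list_1)>number_points_limit and len(list_2)>number_points_limit and len(list_3)>number_points_limit):
-- 		      not_moving_prism_1.append(list_1)
-- 		      not_moving_prism_2.append(list_2)
-- 		      not_moving_prism_3.append(list_3)
-- 	return not_moving_prism_1, not_moving_prism_2, not_moving_prism_3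
-- ===== SOURCE B (Python) =====
-- def _bucketize(times, intervals):
--     # one pass over `times`: drop each index into every interval-bucket it falls in
--     buckets = [[] for _ in intervals]
--     for j, t in enumerate(times):
--         buckets = [b + [j] if debut <= t < fin else b
--                    for b, (debut, fin) in zip(buckets, intervals)]
--     return buckets
--
--
-- def find_prism_not_moving_time(not_moving_time, time_trimble_1, time_trimble_2, time_trimble_3, number_points_limit):
--     b1 = _bucketize(time_trimble_1, not_moving_time)
--     b2 = _bucketize(time_trimble_2, not_moving_time)
--     b3 = _bucketize(time_trimble_3, not_moving_time)
--     r1, r2, r3 = [], [], []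
--     for l1, l2, l3 in zip(b1, b2, b3):
--         if l1 and l2 and l3:
--             r1.append(l1)
--             r2.append(l2)
--             r3.append(l3)
--     return r1, r2, r3
-- ===== Notes on version B (the rewrite author's own statement) =====
-- stated objective: alternative
-- what changed: B inverts the loop nesting: instead of re-scanning each time array once per interval, it makes one pass over each time array dropping indices into per-interval buckets (zip-updated), then filters the bucket triples; the number_points_limit parameter is ignored exactly as A ignores it (A reassigns it to 0).
import Mathlib
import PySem

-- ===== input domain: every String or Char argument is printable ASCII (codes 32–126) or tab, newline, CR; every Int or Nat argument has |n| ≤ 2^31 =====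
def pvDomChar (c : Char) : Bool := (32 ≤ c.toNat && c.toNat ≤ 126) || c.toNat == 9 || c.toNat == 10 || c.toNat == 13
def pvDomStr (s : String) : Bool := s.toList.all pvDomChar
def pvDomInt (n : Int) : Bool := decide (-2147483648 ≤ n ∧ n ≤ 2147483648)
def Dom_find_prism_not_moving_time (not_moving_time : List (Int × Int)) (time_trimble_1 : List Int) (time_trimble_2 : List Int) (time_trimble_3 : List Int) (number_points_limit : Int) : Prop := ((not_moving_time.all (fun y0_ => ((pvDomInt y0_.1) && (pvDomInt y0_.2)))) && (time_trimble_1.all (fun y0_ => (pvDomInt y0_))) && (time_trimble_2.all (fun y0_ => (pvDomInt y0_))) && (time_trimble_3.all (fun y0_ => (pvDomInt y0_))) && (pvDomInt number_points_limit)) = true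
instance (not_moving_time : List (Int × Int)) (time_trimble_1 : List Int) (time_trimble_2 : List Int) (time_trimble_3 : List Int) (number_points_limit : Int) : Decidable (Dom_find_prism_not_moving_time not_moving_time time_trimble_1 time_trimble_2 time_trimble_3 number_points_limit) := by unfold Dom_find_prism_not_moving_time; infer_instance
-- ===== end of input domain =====

-- B inverts the loop nesting (one pass per time array, dropping indices into per-interval buckets) instead of re-scanning each array per interval; same cost, different traversal.


-- ===== PORT A =====
def find_prism_not_moving_time (not_moving_time : List (Int × Int)) (time_trimble_1 : List Int) (time_trimble_2 : List Int) (time_trimble_3 : List Int) (number_points_limit : Int) : List (List Int) × List (List Int) × List (List Int) :=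
  -- Python immediately does `number_points_limit = 0`, shadowing the parameter
  let number_points_limit : Int := 0
  not_moving_time.foldl
    (fun acc i =>
      let debut := i.1
      let fin := i.2
      let list_1 := (PySem.List.pyRange 0 (time_trimble_1.length : Int) 1).foldl
        (fun l j => if PySem.List.pyGetD time_trimble_1 j 0 ≥ debut ∧ PySem.List.pyGetD time_trimble_1 j 0 < fin then l ++ [j] else l) []
      let list_2 := (PySem.List.pyRange 0 (time_trimble_2.length : Int) 1).foldl
        (fun l j => if PySem.List.pyGetD time_trimble_2 j 0 ≥ debut ∧ PySem.List.pyGetD time_trimble_2 j 0 < fin then l ++ [j] else l) []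
      let list_3 := (PySem.List.pyRange 0 (time_trimble_3.length : Int) 1).foldl
        (fun l j => if PySem.List.pyGetD time_trimble_3 j 0 ≥ debut ∧ PySem.List.pyGetD time_trimble_3 j 0 < fin then l ++ [j] else l) []
      if (list_1.length : Int) > number_points_limit ∧ (list_2.length : Int) > number_points_limit ∧ (list_3.length : Int) > number_points_limit then
        (acc.1 ++ [list_1], acc.2.1 ++ [list_2], acc.2.2 ++ [list_3])
      else acc)
    ([], [], [])

-- ===== PORT B =====
-- B-side helper: one pass over `times`, dropping each index into every interval-bucket it falls in
def pvBucketize (times : List Int) (intervals : List (Int × Int)) : List (List Int) :=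
  (PySem.List.enumerate times 0).foldl
    (fun buckets jt =>
      List.zipWith (fun b p => if p.1 ≤ jt.2 ∧ jt.2 < p.2 then b ++ [jt.1] else b) buckets intervals)
    (intervals.map (fun _ => []))

def find_prism_not_moving_time_alt (not_moving_time : List (Int × Int)) (time_trimble_1 : List Int) (time_trimble_2 : List Int) (time_trimble_3 : List Int) (number_points_limit : Int) : List (List Int) × List (List Int) × List (List Int) :=
  let b1 := pvBucketize time_trimble_1 not_moving_time
  let b2 := pvBucketize time_trimble_2 not_moving_time
  let b3 := pvBucketize time_trimble_3 not_moving_time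
  (List.zip b1 (List.zip b2 b3)).foldl
    (fun acc x =>
      if x.1 ≠ [] ∧ x.2.1 ≠ [] ∧ x.2.2 ≠ [] then
        (acc.1 ++ [x.1], acc.2.1 ++ [x.2.1], acc.2.2 ++ [x.2.2])
      else acc)
    ([], [], [])

-- ===== PRECONDITION & SPEC =====
def Spec_find_prism_not_moving_time (not_moving_time : List (Int × Int)) (time_trimble_1 : List Int) (time_trimble_2 : List Int) (time_trimble_3 : List Int) (number_points_limit : Int) (out : List (List Int) × List (List Int) × List (List Int)) : Prop := out = find_prism_not_moving_time_alt not_moving_time time_trimble_1 time_trimble_2 time_trimble_3 number_points_limit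
instance (not_moving_time : List (Int × Int)) (time_trimble_1 : List Int) (time_trimble_2 : List Int) (time_trimble_3 : List Int) (number_points_limit : Int) (out : List (List Int) × List (List Int) × List (List Int)) : Decidable (Spec_find_prism_not_moving_time not_moving_time time_trimble_1 time_trimble_2 time_trimble_3 number_points_limit out) := by unfold Spec_find_prism_not_moving_time; infer_instance

-- ===== CLAIM (what is proved, stated in full; the proofs are below) =====
def Claim_equal_find_prism_not_moving_time : Prop := ∀ (not_moving_time : List (Int × Int)) (time_trimble_1 : List Int) (time_trimble_2 : List Int) (time_trimble_3 : List Int) (number_points_limit : Int), Dom_find_prism_not_moving_time not_moving_time time_trimble_1 time_trimble_2 time_trimble_3 number_points_limit → Spec_find_prism_not_moving_time not_moving_time time_trimble_1 time_trimble_2 time_trimble_3 number_points_limit (find_prism_not_moving_time not_moving_time time_trimble_1 time_trimble_2 time_trimble_3 number_points_limit)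

-- ===== LEMMAS AND PROOFS =====

-- indices (starting at s) of elements of `times` lying in [a, b)
def pvHitsFrom (s : Int) (times : List Int) (a b : Int) : List Int :=
  ((PySem.List.enumerate times s).filter (fun p => decide (a ≤ p.2 ∧ p.2 < b))).map (·.1)

theorem pvHitsFrom_nil (s a b : Int) : pvHitsFrom s [] a b = [] := by
  simp [pvHitsFrom, PySem.List.enumerate]

theorem pvHitsFrom_cons (s : Int) (t : Int) (ts : List Int) (a b : Int) :
    pvHitsFrom s (t :: ts) a b
      = (if a ≤ t ∧ t < b then [s] else []) ++ pvHitsFrom (s + 1) ts a b := by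
  simp only [pvHitsFrom, PySem.List.enumerate_cons, List.filter_cons]
  by_cases hc : a ≤ t ∧ t < b
  · simp [hc]
  · simp [hc]

-- A's inner index-scan loop computes pvHitsFrom 0
theorem pvInnerA (t : List Int) (a b : Int) :
    (PySem.List.pyRange 0 (t.length : Int) 1).foldl
      (fun l j => if PySem.List.pyGetD t j 0 ≥ a ∧ PySem.List.pyGetD t j 0 < b then l ++ [j] else l) []
    = pvHitsFrom 0 t a b := by
  rw [PySem.List.foldl_append_ite_eq_filter
      (fun j => PySem.List.pyGetD t j 0 ≥ a ∧ PySem.List.pyGetD t j 0 < b)]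
  simp only [pvHitsFrom, PySem.List.enumerate_eq_map_pyRange t 0, List.filter_map,
    List.map_map, List.nil_append]
  simp [Function.comp_def, ge_iff_le]

theorem pvZipWith_zipWith {α β γ : Type} (f : γ → β → γ) (g : α → β → γ) (h : α → β → γ)
    (hfg : ∀ x y, f (g x y) y = h x y) :
    ∀ (bs : List α) (cs : List β),
      List.zipWith f (List.zipWith g bs cs) cs = List.zipWith h bs cs := by
  intro bs
  induction bs with
  | nil => intro cs; simp
  | cons x xs ih =>
    intro cs
    cases cs with
    | nil => simp
    | cons c cs => simp [ih, hfg]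

theorem pvZipWith_id {α β : Type} :
    ∀ (bs : List α) (cs : List β), bs.length = cs.length →
      List.zipWith (fun b (_ : β) => b) bs cs = bs := by
  intro bs
  induction bs with
  | nil => intro cs _; simp
  | cons x xs ih =>
    intro cs h
    cases cs with
    | nil => simp at h
    | cons c cs => simpa using ih cs (by simpa using h)

theorem pvBucketize_loop (ts : List Int) :
    ∀ (s : Int) (bs : List (List Int)) (intervals : List (Int × Int)),
      bs.length = intervals.length →
      (PySem.List.enumerate ts s).foldl
        (fun buckets jt =>
          List.zipWith (fun b p => if p.1 ≤ jt.2 ∧ jt.2 < p.2 then b ++ [jt.1] else b) buckets intervals)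
        bs
      = List.zipWith (fun b p => b ++ pvHitsFrom s ts p.1 p.2) bs intervals := by
  induction ts with
  | nil =>
    intro s bs intervals h
    simp only [PySem.List.enumerate, List.foldl_nil]
    rw [show (fun (b : List Int) (p : Int × Int) => b ++ pvHitsFrom s [] p.1 p.2)
          = (fun (b : List Int) (_ : Int × Int) => b) by
        funext b p; simp [pvHitsFrom_nil]]
    exact (pvZipWith_id bs intervals h).symm
  | cons t ts ih =>
    intro s bs intervals h
    rw [PySem.List.enumerate_cons, List.foldl_cons,
      ih (s + 1) _ intervals (by simp [h]),
      pvZipWith_zipWith _ _ (fun b p => b ++ pvHitsFrom s (t :: ts) p.1 p.2)]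
    intro x y
    rw [pvHitsFrom_cons]
    split_ifs with hc <;> simp

theorem pvZipWith_map_left {α β γ : Type} (f : γ → α → β) (g : α → γ) (l : List α) :
    List.zipWith f (l.map g) l = l.map (fun x => f (g x) x) := by
  induction l with
  | nil => rfl
  | cons x xs ih => simp [ih]

theorem pvBucketize_eq (ts : List Int) (intervals : List (Int × Int)) :
    pvBucketize ts intervals = intervals.map (fun p => pvHitsFrom 0 ts p.1 p.2) := by
  rw [pvBucketize, pvBucketize_loop ts 0 _ intervals (by simp),
    pvZipWith_map_left]
  simp

theorem pvLenPos (l : List Int) : ((l.length : Int) > 0) = (l ≠ []) := by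
  simp [List.length_pos_iff]

-- ===== VERDICT (by name: the statement is the Claim_ definition above) =====
theorem find_prism_not_moving_time_spec : Claim_equal_find_prism_not_moving_time := by
  intro nmt t1 t2 t3 npl _
  unfold Spec_find_prism_not_moving_time
  unfold find_prism_not_moving_time find_prism_not_moving_time_alt
  simp only [pvBucketize_eq, List.zip_map', List.foldl_map, pvInnerA, pvLenPos]
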